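-- pv_equiv track=rewrite | github.com/Arthur-Dauphole/Projet-BRAIN | Arthur_2/BRAIN_PROJECT/modules/detector.py | _compute_shape_signature
-- ===== SOURCE A (Python) =====
-- from typing import List, Tuple, Optional
--
-- def _compute_shape_signature(
--
--     pixels: List[Tuple[int, int]],
--     bbox: Tuple[int, int, int, int]
-- ) -> str:
--     """
--     Compute a unique signature for the shape that is translation-invariant.
--     This helps identify if two blobs have the same shape.
--
--     Returns a normalized binary string representation.
--     """
--     if not pixels or bbox is None:
--         return ""
--
--     min_r, min_c, max_r, max_c = bbox
--     height = max_r - min_r + 1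
--     width = max_c - min_c + 1
--
--     # Create normalized grid
--     pixel_set = set(pixels)
--     signature = []
--
--     for r in range(min_r, max_r + 1):
--         row_sig = ""
--         for c in range(min_c, max_c + 1):
--             row_sig += "1" if (r, c) in pixel_set else "0"
--         signature.append(row_sig)
--
--     return "|".join(signature)
-- ===== SOURCE B (Python) =====
-- from typing import List, Tuple
--
-- def _compute_shape_signature(
--     pixels: List[Tuple[int, int]],
--     bbox: Tuple[int, int, int, int]
-- ) -> str:
--     # Scatter: preallocate a '0'-filled grid and mark each in-bounds pixel.
--     if not pixels or bbox is None:
--         return ""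
--     min_r, min_c, max_r, max_c = bbox
--     height = max_r - min_r + 1
--     width = max_c - min_c + 1
--     rows = [bytearray(b"0") * width for _ in range(height)]
--     for r, c in pixels:
--         i = r - min_r
--         j = c - min_c
--         if 0 <= i < height and 0 <= j < width:
--             rows[i][j] = ord("1")
--     return "|".join(row.decode("ascii") for row in rows)
-- ===== Notes on version B (the rewrite author's own statement) =====
-- stated objective: alternative
-- what changed: A gathers: for every grid cell it tests membership of (r,c) in a set of the pixels; B scatters: it preallocates a '0'-filled height-by-width grid and marks the position of each in-bounds pixel, then joins the rows.
import Mathlib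
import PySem

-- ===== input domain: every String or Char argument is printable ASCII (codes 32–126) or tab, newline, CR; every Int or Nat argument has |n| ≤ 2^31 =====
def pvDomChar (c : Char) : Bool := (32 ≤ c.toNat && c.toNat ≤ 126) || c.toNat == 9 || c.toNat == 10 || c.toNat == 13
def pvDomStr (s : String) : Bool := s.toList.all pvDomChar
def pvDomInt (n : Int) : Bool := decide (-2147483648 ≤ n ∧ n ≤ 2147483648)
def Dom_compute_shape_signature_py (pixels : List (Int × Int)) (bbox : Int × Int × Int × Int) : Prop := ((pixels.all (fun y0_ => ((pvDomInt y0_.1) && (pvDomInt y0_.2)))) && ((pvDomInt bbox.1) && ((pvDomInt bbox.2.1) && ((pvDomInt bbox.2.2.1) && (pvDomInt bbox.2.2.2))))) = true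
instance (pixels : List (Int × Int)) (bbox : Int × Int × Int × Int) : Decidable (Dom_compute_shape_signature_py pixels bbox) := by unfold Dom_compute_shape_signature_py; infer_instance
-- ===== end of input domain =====

-- B scatters each pixel into a preallocated '0' grid instead of A's per-cell set-membership gather; same result, alternative decomposition.

-- ===== PORT A =====
-- inner loop: row_sig += "1" if (r, c) in pixel_set else "0"
def pvRowA (pixel_set : PySem.Set (Int × Int)) (r min_c max_c : Int) : List Char :=
  (PySem.List.pyRange min_c (max_c + 1) 1).foldl
    (fun row_sig c => row_sig ++ (if PySem.Set.contains pixel_set (r, c) then ['1'] else ['0'])) []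

def compute_shape_signature_py (pixels : List (Int × Int)) (bbox : Int × Int × Int × Int) : String :=
  if pixels = [] then "" else
    match bbox with
    | (min_r, min_c, max_r, max_c) =>
      let pixel_set : PySem.Set (Int × Int) := PySem.Set.ofList pixels
      let signature : List (List Char) :=
        (PySem.List.pyRange min_r (max_r + 1) 1).foldl
          (fun sig r => sig ++ [pvRowA pixel_set r min_c max_c]) []
      String.mk (PySem.Chars.join ['|'] signature)

-- ===== PORT B =====
-- one iteration of the pixel loop: if 0<=r-min_r<height and 0<=c-min_c<width: rows[r-min_r][c-min_c] = '1'
def pvStep (min_r min_c height width : Int) (rows : List (List Char)) (p : Int × Int) : List (List Char) :=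
  if 0 ≤ p.1 - min_r ∧ p.1 - min_r < height ∧ 0 ≤ p.2 - min_c ∧ p.2 - min_c < width then
    PySem.List.pySetD rows (p.1 - min_r)
      (PySem.List.pySetD (PySem.List.pyGetD rows (p.1 - min_r) []) (p.2 - min_c) '1')
  else rows

def pvScatter (min_r min_c height width : Int) (pixels : List (Int × Int))
    (rows : List (List Char)) : List (List Char) :=
  pixels.foldl (pvStep min_r min_c height width) rows

def compute_shape_signature_py_alt (pixels : List (Int × Int)) (bbox : Int × Int × Int × Int) : String :=
  if pixels = [] then "" else
    match bbox with
    | (min_r, min_c, max_r, max_c) =>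
      let height := max_r - min_r + 1
      let width := max_c - min_c + 1
      let rows0 : List (List Char) := List.replicate height.toNat (List.replicate width.toNat '0')
      let rows := pvScatter min_r min_c height width pixels rows0
      String.mk (PySem.Chars.join ['|'] rows)

-- ===== PRECONDITION & SPEC =====
def Spec_compute_shape_signature_py (pixels : List (Int × Int)) (bbox : Int × Int × Int × Int) (out : String) : Prop := out = compute_shape_signature_py_alt pixels bbox
instance (pixels : List (Int × Int)) (bbox : Int × Int × Int × Int) (out : String) : Decidable (Spec_compute_shape_signature_py pixels bbox out) := by unfold Spec_compute_shape_signature_py; infer_instance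

-- ===== CLAIM (what is proved, stated in full; the proofs are below) =====
def Claim_equal_compute_shape_signature_py : Prop := ∀ (pixels : List (Int × Int)) (bbox : Int × Int × Int × Int), Dom_compute_shape_signature_py pixels bbox → Spec_compute_shape_signature_py pixels bbox (compute_shape_signature_py pixels bbox)

-- ===== LEMMAS AND PROOFS =====

-- glue: List.getD at an in-range index
lemma pvGetD_eq {α : Type} (l : List α) (d : α) (i : Nat) (h : i < l.length) :
    l.getD i d = l[i] := by
  rw [List.getD_eq_getElem?_getD, List.getElem?_eq_getElem h]
  rfl

-- the common normal form: the indicator grid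
def pvCanon (pixels : List (Int × Int)) (min_r min_c max_r max_c : Int) : List (List Char) :=
  (PySem.List.pyRange min_r (max_r + 1) 1).map (fun r =>
    (PySem.List.pyRange min_c (max_c + 1) 1).map (fun c =>
      if (r, c) ∈ pixels then '1' else '0'))

lemma pvRowA_eq (pixels : List (Int × Int)) (r min_c max_c : Int) :
    pvRowA (PySem.Set.ofList pixels) r min_c max_c =
      (PySem.List.pyRange min_c (max_c + 1) 1).map
        (fun c => if (r, c) ∈ pixels then '1' else '0') := by
  have h : ∀ c : Int,
      (if PySem.Set.contains (PySem.Set.ofList pixels) (r, c) then (['1'] : List Char) else ['0'])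
        = [if (r, c) ∈ pixels then '1' else '0'] := by
    intro c
    by_cases hc : (r, c) ∈ pixels
    · simp [(PySem.Set.contains_iff _ _).2 ((PySem.Set.mem_ofList _ _).2 hc), hc]
    · have hb : PySem.Set.contains (PySem.Set.ofList pixels) (r, c) ≠ true := by
        intro hh
        exact hc ((PySem.Set.mem_ofList _ _).1 ((PySem.Set.contains_iff _ _).1 hh))
      simp only [hb, Bool.false_eq_true, if_false, hc, if_neg hc]
  unfold pvRowA
  simp only [h]
  simpa using PySem.List.foldl_append_singleton_eq_map
    (fun c => if (r, c) ∈ pixels then '1' else '0') (PySem.List.pyRange min_c (max_c + 1) 1) []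

lemma pvA_eq_canon (pixels : List (Int × Int)) (min_r min_c max_r max_c : Int)
    (h : pixels ≠ []) :
    compute_shape_signature_py pixels (min_r, min_c, max_r, max_c)
      = String.mk (PySem.Chars.join ['|'] (pvCanon pixels min_r min_c max_r max_c)) := by
  unfold compute_shape_signature_py
  simp only [h, if_false]
  congr 1
  congr 1
  have hfold := PySem.List.foldl_append_singleton_eq_map
    (fun r => pvRowA (PySem.Set.ofList pixels) r min_c max_c)
    (PySem.List.pyRange min_r (max_r + 1) 1) []
  simp only [List.nil_append] at hfold
  rw [hfold]
  unfold pvCanon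
  exact List.map_congr_left (fun r _ => pvRowA_eq pixels r min_c max_c)

-- one step preserves the grid shape
lemma pvStep_shape (min_r min_c height width : Int) (rows : List (List Char)) (p : Int × Int)
    (w : Nat) (hlen : rows.length = height.toNat) (hrow : ∀ row ∈ rows, row.length = w) :
    (pvStep min_r min_c height width rows p).length = height.toNat ∧
      ∀ row ∈ pvStep min_r min_c height width rows p, row.length = w := by
  unfold pvStep
  split_ifs with hg
  · rw [PySem.List.pySetD_of_nonneg _ _ hg.1, PySem.List.pyGetD_of_nonneg _ _ hg.1,
        PySem.List.pySetD_of_nonneg _ _ hg.2.2.1]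
    have halt : (p.1 - min_r).toNat < rows.length := by omega
    refine ⟨by rw [List.length_set]; exact hlen, ?_⟩
    intro row hr
    rcases List.mem_or_eq_of_mem_set hr with hmem | heq
    · exact hrow row hmem
    · subst heq
      rw [List.length_set, pvGetD_eq _ _ _ halt]
      exact hrow _ (List.getElem_mem halt)
  · exact ⟨hlen, hrow⟩

-- one step writes exactly the cell of its pixel (when that pixel is in bounds)
lemma pvStep_cell (min_r min_c height width : Int) (rows : List (List Char)) (p : Int × Int)
    (w : Nat) (hlen : rows.length = height.toNat) (hrow : ∀ row ∈ rows, row.length = w)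
    (hw : (w : Int) = width) (i j : Nat) (hi : i < height.toNat) (hj : j < w) :
    ((pvStep min_r min_c height width rows p).getD i []).getD j '0' =
      if p = (min_r + i, min_c + j) then '1' else (rows.getD i []).getD j '0' := by
  unfold pvStep
  by_cases hg : 0 ≤ p.1 - min_r ∧ p.1 - min_r < height ∧ 0 ≤ p.2 - min_c ∧ p.2 - min_c < width
  · rw [if_pos hg, PySem.List.pySetD_of_nonneg _ _ hg.1, PySem.List.pyGetD_of_nonneg _ _ hg.1,
        PySem.List.pySetD_of_nonneg _ _ hg.2.2.1]
    set a := (p.1 - min_r).toNat with ha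
    set b := (p.2 - min_c).toNat with hb
    set v : List Char := (rows.getD a []).set b '1' with hv
    have halt : a < rows.length := by omega
    have hilt : i < rows.length := by omega
    have hlen' : i < (rows.set a v).length := by rw [List.length_set]; exact hilt
    rw [pvGetD_eq _ _ _ hlen']
    have hrl : (rows.getD a []).length = w := by
      rw [pvGetD_eq _ _ _ halt]
      exact hrow _ (List.getElem_mem halt)
    by_cases hai : a = i
    · subst hai
      have h1 : (rows.set a v)[a]? = some v := by
        rw [List.getElem?_set, if_pos rfl, if_pos halt]
      have h2 := List.getElem?_eq_getElem hlen'
      rw [h1] at h2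
      have hva : (rows.set a v)[a]'hlen' = v := (Option.some.inj h2.symm)
      rw [hva]
      have hjv : j < v.length := by rw [hv, List.length_set, hrl]; exact hj
      rw [pvGetD_eq _ _ _ hjv]
      by_cases hbj : b = j
      · subst hbj
        have hbw : b < (rows.getD a []).length := by rw [hrl]; exact hj
        have h3 : v[b]? = some '1' := by
          rw [hv, List.getElem?_set, if_pos rfl, if_pos hbw]
        have h4 := List.getElem?_eq_getElem hjv
        rw [h3] at h4
        have hp : p = (min_r + (a : Int), min_c + (b : Int)) := by
          have e1 : p.1 = min_r + (a : Int) := by omega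
          have e2 : p.2 = min_c + (b : Int) := by omega
          exact Prod.ext e1 e2
        rw [if_pos hp]
        exact (Option.some.inj h4.symm)
      · have hjw : j < (rows.getD a []).length := by rw [hrl]; exact hj
        have h3 : v[j]? = some ((rows.getD a [])[j]'hjw) := by
          rw [hv, List.getElem?_set, if_neg hbj]
          exact List.getElem?_eq_getElem hjw
        have h4 := List.getElem?_eq_getElem hjv
        rw [h3] at h4
        have hp : p ≠ (min_r + (a : Int), min_c + (j : Int)) := by
          intro hpe
          apply hbj
          have h2' := congrArg Prod.snd hpe
          simp only at h2'
          omega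
        rw [if_neg hp, pvGetD_eq _ _ _ hjw]
        exact (Option.some.inj h4.symm)
    · have h1 : (rows.set a v)[i]? = some (rows[i]'hilt) := by
        rw [List.getElem?_set, if_neg hai]
        exact List.getElem?_eq_getElem hilt
      have h2 := List.getElem?_eq_getElem hlen'
      rw [h1] at h2
      have hvi : (rows.set a v)[i]'hlen' = rows[i]'hilt := (Option.some.inj h2.symm)
      rw [hvi]
      have hp : p ≠ (min_r + (i : Int), min_c + (j : Int)) := by
        intro hpe
        apply hai
        have h1' := congrArg Prod.fst hpe
        simp only at h1'
        omega
      rw [if_neg hp, pvGetD_eq _ _ _ hilt]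
  · rw [if_neg hg]
    have hp : p ≠ (min_r + (i : Int), min_c + (j : Int)) := by
      intro hpe
      apply hg
      rw [hpe]
      refine ⟨by omega, by omega, by omega, by omega⟩
    rw [if_neg hp]

-- shape invariant of the whole scatter fold
lemma pvScatter_shape (min_r min_c height width : Int) (pixels : List (Int × Int))
    (rows : List (List Char)) (w : Nat)
    (hlen : rows.length = height.toNat)
    (hrow : ∀ row ∈ rows, row.length = w) :
    (pvScatter min_r min_c height width pixels rows).length = height.toNat ∧
      ∀ row ∈ pvScatter min_r min_c height width pixels rows, row.length = w := by
  induction pixels generalizing rows with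
  | nil => exact ⟨hlen, hrow⟩
  | cons p rest ih =>
    rw [show pvScatter min_r min_c height width (p :: rest) rows
          = pvScatter min_r min_c height width rest (pvStep min_r min_c height width rows p)
        from rfl]
    have hsh := pvStep_shape min_r min_c height width rows p w hlen hrow
    exact ih _ hsh.1 hsh.2

-- cell characterisation of the scatter fold
lemma pvScatter_cell (min_r min_c height width : Int) (pixels : List (Int × Int))
    (rows : List (List Char)) (w : Nat)
    (hlen : rows.length = height.toNat)
    (hrow : ∀ row ∈ rows, row.length = w)
    (hw : (w : Int) = width)
    (i j : Nat) (hi : i < height.toNat) (hj : j < w) :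
    ((pvScatter min_r min_c height width pixels rows).getD i []).getD j '0' =
      if (min_r + i, min_c + j) ∈ pixels then '1' else (rows.getD i []).getD j '0' := by
  induction pixels generalizing rows with
  | nil => simp [pvScatter]
  | cons p rest ih =>
    rw [show pvScatter min_r min_c height width (p :: rest) rows
          = pvScatter min_r min_c height width rest (pvStep min_r min_c height width rows p)
        from rfl]
    have hsh := pvStep_shape min_r min_c height width rows p w hlen hrow
    rw [ih _ hsh.1 hsh.2,
        pvStep_cell min_r min_c height width rows p w hlen hrow hw i j hi hj]
    by_cases hp : p = (min_r + (i : Int), min_c + (j : Int))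
    · subst hp
      by_cases hm : (min_r + (i : Int), min_c + (j : Int)) ∈ rest <;> simp [List.mem_cons, hm]
    · by_cases hm : (min_r + (i : Int), min_c + (j : Int)) ∈ rest <;>
        simp [List.mem_cons, hm, hp, Ne.symm hp]

lemma pvB_eq_canon (pixels : List (Int × Int)) (min_r min_c max_r max_c : Int)
    (h : pixels ≠ []) :
    compute_shape_signature_py_alt pixels (min_r, min_c, max_r, max_c)
      = String.mk (PySem.Chars.join ['|'] (pvCanon pixels min_r min_c max_r max_c)) := by
  unfold compute_shape_signature_py_alt
  simp only [h, if_false]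
  congr 1
  congr 1
  set height := max_r - min_r + 1 with hhdef
  set width := max_c - min_c + 1 with hwdef
  set rows0 : List (List Char) := List.replicate height.toNat (List.replicate width.toNat '0')
    with hr0
  have hrow0 : ∀ row ∈ rows0, row.length = width.toNat := by
    intro row hr
    rw [List.eq_of_mem_replicate hr, List.length_replicate]
  have hlen0 : rows0.length = height.toNat := List.length_replicate
  have hshape := pvScatter_shape min_r min_c height width pixels rows0 width.toNat hlen0 hrow0
  have hlenC : (pvCanon pixels min_r min_c max_r max_c).length = height.toNat := by
    unfold pvCanon
    rw [List.length_map, PySem.List.length_pyRange_one]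
    omega
  apply List.ext_getElem (by rw [hshape.1, hlenC])
  intro i hi1 hi2
  have hi : i < height.toNat := by rw [hshape.1] at hi1; exact hi1
  have hrowS : (pvScatter min_r min_c height width pixels rows0)[i].length = width.toNat :=
    hshape.2 _ (List.getElem_mem hi1)
  have hrowC : (pvCanon pixels min_r min_c max_r max_c)[i].length = width.toNat := by
    unfold pvCanon
    rw [List.getElem_map, List.length_map, PySem.List.length_pyRange_one]
    omega
  apply List.ext_getElem (by rw [hrowS, hrowC])
  intro j hj1 hj2
  have hj : j < width.toNat := by rw [hrowS] at hj1; exact hj1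
  have hcell := pvScatter_cell min_r min_c height width pixels rows0 width.toNat hlen0 hrow0
    (by omega) i j hi hj
  rw [pvGetD_eq _ _ _ hi1, pvGetD_eq _ _ _ hj1] at hcell
  have hR0 : ((rows0.getD i []).getD j '0') = '0' := by
    have e1 : rows0.getD i [] = List.replicate width.toNat '0' := by
      rw [pvGetD_eq _ _ _ (by rw [hlen0]; exact hi)]
      simp [hr0]
    rw [e1, pvGetD_eq _ _ _ (by simpa using hj)]
    simp
  rw [hR0] at hcell
  rw [hcell]
  simp only [pvCanon, List.getElem_map, PySem.List.getElem_pyRange_one]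

-- ===== VERDICT (by name: the statement is the Claim_ definition above) =====
theorem compute_shape_signature_py_spec : Claim_equal_compute_shape_signature_py := by
  intro pixels bbox _
  unfold Spec_compute_shape_signature_py
  obtain ⟨min_r, min_c, max_r, max_c⟩ := bbox
  by_cases h : pixels = []
  · subst h; rfl
  · rw [pvA_eq_canon pixels min_r min_c max_r max_c h,
        pvB_eq_canon pixels min_r min_c max_r max_c h]
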